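-- pv_equiv track=rewrite | github.com/PhNorberg/Python-StarcraftII | map_decomposer.py | get_octile_coordinates
-- ===== SOURCE A (Python) =====
-- def get_octile_coordinates(distance: int, x: int, y: int) -> list:
--     tile = (x,y)
--     octile_coordinates = []
--     for x in range(-distance, distance+1):
--          for y in range(-distance, distance+1):
--              if -distance in (x,y) or distance in (x,y):
--                   octile_coordinates.append((tile[0]+x, tile[1]+y))
--     return octile_coordinates
-- ===== SOURCE B (Python) =====
-- def get_octile_coordinates(distance: int, x: int, y: int) -> list:
--     if distance < 0:
--         return []
--     if distance == 0:
--         return [(x, y)]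
--     cols = range(y - distance, y + distance + 1)
--     top = [(x - distance, yy) for yy in cols]
--     mid = [p for xx in range(x - distance + 1, x + distance)
--              for p in ((xx, y - distance), (xx, y + distance))]
--     bot = [(x + distance, yy) for yy in cols]
--     return top + mid + bot
-- ===== Notes on version B (the rewrite author's own statement) =====
-- stated objective: faster
-- what changed: Instead of scanning the full (2d+1)x(2d+1) square of offsets and filtering for boundary cells, B builds the ring as three staged comprehensions over absolute coordinates (top row, interior side pairs, bottom row) and concatenates them, with explicit returns for the degenerate distances <= 0.
import Mathlib
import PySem

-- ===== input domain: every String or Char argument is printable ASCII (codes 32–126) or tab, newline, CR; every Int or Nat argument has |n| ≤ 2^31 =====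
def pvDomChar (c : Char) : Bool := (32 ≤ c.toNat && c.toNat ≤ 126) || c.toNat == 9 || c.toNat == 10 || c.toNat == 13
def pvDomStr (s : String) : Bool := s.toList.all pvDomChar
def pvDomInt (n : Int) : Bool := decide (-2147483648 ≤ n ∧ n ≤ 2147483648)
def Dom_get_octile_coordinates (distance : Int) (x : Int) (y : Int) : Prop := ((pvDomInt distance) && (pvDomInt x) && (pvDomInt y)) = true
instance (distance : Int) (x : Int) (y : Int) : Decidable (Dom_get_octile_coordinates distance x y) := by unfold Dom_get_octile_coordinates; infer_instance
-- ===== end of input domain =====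

-- B builds the ring as three staged segments over absolute coordinates (top row, interior
-- side-pair rows, bottom row) concatenated, with explicit degenerate cases distance ≤ 0,
-- instead of A's O(distance²) full-square scan with a boundary filter; same output order.

-- ===== PORT A =====
-- literal port of A: scan the whole (2d+1)×(2d+1) offset square, append when on the boundary
def get_octile_coordinates (distance : Int) (x : Int) (y : Int) : List (Int × Int) :=
  (PySem.List.pyRange (-distance) (distance + 1) 1).foldl (fun acc dx =>
    (PySem.List.pyRange (-distance) (distance + 1) 1).foldl (fun acc2 dy =>
      if dx = -distance ∨ dy = -distance ∨ dx = distance ∨ dy = distance then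
        acc2 ++ [(x + dx, y + dy)]
      else acc2) acc) []

-- ===== PORT B =====
-- literal port of B: top row, interior side pairs, bottom row, in absolute coordinates
def get_octile_coordinates_alt (distance : Int) (x : Int) (y : Int) : List (Int × Int) :=
  if distance < 0 then []
  else if distance = 0 then [(x, y)]
  else
    let cols := PySem.List.pyRange (y - distance) (y + distance + 1) 1
    let top := cols.map (fun yy => (x - distance, yy))
    let mid := (PySem.List.pyRange (x - distance + 1) (x + distance) 1).flatMap
      (fun xx => [(xx, y - distance), (xx, y + distance)])
    let bot := cols.map (fun yy => (x + distance, yy))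
    top ++ mid ++ bot

-- ===== PRECONDITION & SPEC =====
def Spec_get_octile_coordinates (distance : Int) (x : Int) (y : Int) (out : List (Int × Int)) : Prop := out = get_octile_coordinates_alt distance x y
instance (distance : Int) (x : Int) (y : Int) (out : List (Int × Int)) : Decidable (Spec_get_octile_coordinates distance x y out) := by unfold Spec_get_octile_coordinates; infer_instance

-- ===== CLAIM (what is proved, stated in full; the proofs are below) =====
def Claim_equal_get_octile_coordinates : Prop := ∀ (distance : Int) (x : Int) (y : Int), Dom_get_octile_coordinates distance x y → Spec_get_octile_coordinates distance x y (get_octile_coordinates distance x y)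

-- ===== LEMMAS AND PROOFS =====

-- shifting a unit-step range: mapping (c + ·) over range a…b is range (c+a)…(c+b)
theorem pv_map_add_pyRange (c a b : Int) :
    (PySem.List.pyRange a b 1).map (fun t => c + t) = PySem.List.pyRange (c + a) (c + b) 1 := by
  rw [PySem.List.pyRange_one, PySem.List.pyRange_one, List.map_map]
  have : (c + b - (c + a)).toNat = (b - a).toNat := by omega
  rw [this]
  apply List.map_congr_left
  intro k _
  simp only [Function.comp_apply]
  omega

-- flatMap respects pointwise equality on members
theorem pv_flatMap_congr {α β : Type} (l : List α) (f g : α → List β)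
    (h : ∀ a ∈ l, f a = g a) : l.flatMap f = l.flatMap g := by
  induction l with
  | nil => rfl
  | cons a t ih =>
    simp only [List.flatMap_cons, h a (List.mem_cons_self), ih (fun b hb => h b (List.mem_cons_of_mem a hb))]

-- filtering "= a or = b" out of the tail a+1 … b of a range keeps only b
theorem pv_filter_tail (a b : Int) (hab : a < b) :
    ∀ (n : Nat) (c : Int), a < c → c ≤ b → (b - c).toNat = n →
      (PySem.List.pyRange c (b + 1) 1).filter (fun t => decide (t = a ∨ t = b)) = [b] := by
  intro n
  induction n with
  | zero =>
    intro c h1 h2 h3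
    have : c = b := by omega
    subst this
    rw [PySem.List.pyRange_one_singleton]
    simp [show c ≠ a by omega]
  | succ n ih =>
    intro c h1 h2 h3
    have hc : c < b := by omega
    rw [PySem.List.pyRange_one_cons (by omega : c < b + 1), List.filter_cons]
    simp only [show c ≠ a by omega, show c ≠ b by omega, or_self,
      decide_false, if_neg, Bool.false_eq_true, not_false_eq_true]
    exact ih (c + 1) (by omega) (by omega) (by omega)

-- filtering "= a or = b" out of the full range a … b gives [a, b]  (a < b)
theorem pv_filter_ends (a b : Int) (hab : a < b) :
    (PySem.List.pyRange a (b + 1) 1).filter (fun t => decide (t = a ∨ t = b)) = [a, b] := by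
  rw [PySem.List.pyRange_one_cons (by omega : a < b + 1), List.filter_cons]
  simp only [decide_eq_true_eq, true_or, if_pos]
  rw [pv_filter_tail a b hab (b - (a + 1)).toNat (a + 1) (by omega) (by omega) rfl]

-- A's value as a flatMap of per-row segments
theorem pv_A_flatMap (d x y : Int) :
    get_octile_coordinates d x y
    = (PySem.List.pyRange (-d) (d + 1) 1).flatMap (fun dx =>
        ((PySem.List.pyRange (-d) (d + 1) 1).filter
          (fun dy => decide (dx = -d ∨ dy = -d ∨ dx = d ∨ dy = d))).map
          (fun dy => (x + dx, y + dy))) := by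
  unfold get_octile_coordinates
  have hA : ∀ acc : List (Int × Int), ∀ dx : Int,
      (PySem.List.pyRange (-d) (d + 1) 1).foldl (fun acc2 dy =>
        if dx = -d ∨ dy = -d ∨ dx = d ∨ dy = d then acc2 ++ [(x + dx, y + dy)] else acc2) acc
      = acc ++ ((PySem.List.pyRange (-d) (d + 1) 1).filter
          (fun dy => decide (dx = -d ∨ dy = -d ∨ dx = d ∨ dy = d))).map (fun dy => (x + dx, y + dy)) := by
    intro acc dx
    exact PySem.List.foldl_append_ite _ _ _ _
  simp only [hA]
  rw [PySem.List.foldl_append_eq_flatMap]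
  simp

-- on a full-boundary row (dx = ±d) the filter keeps every dy
theorem pv_row_full (d x y dx : Int) (h : dx = -d ∨ dx = d) :
    ((PySem.List.pyRange (-d) (d + 1) 1).filter
        (fun dy => decide (dx = -d ∨ dy = -d ∨ dx = d ∨ dy = d))).map
        (fun dy => (x + dx, y + dy))
    = (PySem.List.pyRange (y - d) (y + d + 1) 1).map (fun yy => (x + dx, yy)) := by
  rw [List.filter_eq_self.mpr (by intro t _; simp only [decide_eq_true_eq]; tauto)]
  have h2 : PySem.List.pyRange (y - d) (y + d + 1) 1
      = (PySem.List.pyRange (-d) (d + 1) 1).map (fun t => y + t) := by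
    rw [pv_map_add_pyRange y (-d) (d + 1),
        show y + -d = y - d from by omega, show y + (d + 1) = y + d + 1 from by omega]
  rw [h2, List.map_map]
  rfl

-- flatMap over a range a … b splits as head, interior, last  (a < b)
theorem pv_flatMap_split {β : Type} (a b : Int) (hab : a < b) (F : Int → List β) :
    (PySem.List.pyRange a (b + 1) 1).flatMap F
    = F a ++ (PySem.List.pyRange (a + 1) b 1).flatMap F ++ F b := by
  rw [PySem.List.pyRange_one_cons (by omega : a < b + 1),
      PySem.List.pyRange_one_succ_right (by omega : a + 1 ≤ b)]
  simp [List.flatMap_append]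

-- ===== VERDICT (by name: the statement is the Claim_ definition above) =====
theorem get_octile_coordinates_spec : Claim_equal_get_octile_coordinates := by
  intro d x y _
  unfold Spec_get_octile_coordinates
  rw [pv_A_flatMap]
  unfold get_octile_coordinates_alt
  by_cases hneg : d < 0
  · rw [if_pos hneg, PySem.List.pyRange_one_eq_nil (by omega)]
    rfl
  by_cases h0 : d = 0
  · subst h0
    rw [if_neg hneg, if_pos rfl]
    have h1 : PySem.List.pyRange 0 1 1 = [0] := by
      rw [show (1 : Int) = 0 + 1 from rfl]
      exact PySem.List.pyRange_one_singleton 0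
    simp [h1]
  · -- d > 0: split the offset range into -d, interior, d and match B's three segments
    have hd : 0 < d := by omega
    rw [if_neg hneg, if_neg h0]
    have htop := pv_row_full d x y (-d) (Or.inl rfl)
    have hbot := pv_row_full d x y d (Or.inr rfl)
    have hmid : (PySem.List.pyRange (-d + 1) d 1).flatMap
          (fun dx => ((PySem.List.pyRange (-d) (d + 1) 1).filter
              (fun dy => decide (dx = -d ∨ dy = -d ∨ dx = d ∨ dy = d))).map
              (fun dy => (x + dx, y + dy)))
        = (PySem.List.pyRange (x - d + 1) (x + d) 1).flatMap
            (fun xx => [(xx, y - d), (xx, y + d)]) := by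
      have hr : PySem.List.pyRange (x - d + 1) (x + d) 1
          = (PySem.List.pyRange (-d + 1) d 1).map (fun t => x + t) := by
        rw [pv_map_add_pyRange x (-d + 1) d,
            show x + (-d + 1) = x - d + 1 from by omega]
      rw [hr, List.flatMap_map]
      apply pv_flatMap_congr
      intro dx hdx
      rw [PySem.List.mem_pyRange_one] at hdx
      have hfix : (fun dy => decide (dx = -d ∨ dy = -d ∨ dx = d ∨ dy = d))
          = (fun dy => decide (dy = -d ∨ dy = d)) := by
        funext dy
        simp only [decide_eq_decide]
        constructor
        · rintro (h | h | h | h) <;> omega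
        · rintro (h | h) <;> tauto
      rw [hfix, pv_filter_ends (-d) d (by omega)]
      simp [show y + -d = y - d from by omega]
    rw [pv_flatMap_split (-d) d (by omega), htop, hbot, hmid]
    simp only [show x + -d = x - d from by omega]
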